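-- pv_equiv track=rewrite | github.com/ljaewon97/Algorithm | Programmers/KAKAO/Level 1/크레인 인형뽑기 게임.py | solution
-- ===== SOURCE A (Python) =====
-- def solution(board, moves):
--     answer = 0
--     stk = [[] for _ in range(len(board))]
--     basket = []
--     for i in range(len(board)-1, -1, -1):
--         for j in range(len(board)):
--             if board[i][j] != 0:
--                 stk[j].append(board[i][j])
--
--     for move in moves:
--         if stk[move-1]:
--             basket.append(stk[move-1].pop())
--             if len(basket) > 1 and basket[-1] == basket[-2]:
--                 basket.pop()
--                 basket.pop()
--                 answer += 2
--     return answer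
-- ===== SOURCE B (Python) =====
-- def solution(board, moves):
--     # Work on a copy of the board instead of precomputed per-column stacks:
--     # for each move, scan that column top-down for the first non-zero doll.
--     grid = [row[:] for row in board]
--     answer = 0
--     basket = []
--     for move in moves:
--         c = move - 1
--         for row in grid:
--             v = row[c]
--             if v != 0:
--                 row[c] = 0
--                 if basket and basket[-1] == v:
--                     basket.pop()
--                     answer += 2
--                 else:
--                     basket.append(v)
--                 break
--     return answer
-- ===== Notes on version B (the rewrite author's own statement) =====
-- stated objective: alternative
-- what changed: B drops A's precomputed per-column stacks entirely: it works on a row-copied board and, for each move, scans that column of the copy top-down for the first non-zero doll, zeroes the cell and applies the pair-cancellation directly (checking the basket top before appending instead of append-then-compare).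
-- outside the precondition, e.g. on solution([[1, 0, 1], [1, 0, 1]], [0, 0]): A returns 0, B returns 2
import Mathlib
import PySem

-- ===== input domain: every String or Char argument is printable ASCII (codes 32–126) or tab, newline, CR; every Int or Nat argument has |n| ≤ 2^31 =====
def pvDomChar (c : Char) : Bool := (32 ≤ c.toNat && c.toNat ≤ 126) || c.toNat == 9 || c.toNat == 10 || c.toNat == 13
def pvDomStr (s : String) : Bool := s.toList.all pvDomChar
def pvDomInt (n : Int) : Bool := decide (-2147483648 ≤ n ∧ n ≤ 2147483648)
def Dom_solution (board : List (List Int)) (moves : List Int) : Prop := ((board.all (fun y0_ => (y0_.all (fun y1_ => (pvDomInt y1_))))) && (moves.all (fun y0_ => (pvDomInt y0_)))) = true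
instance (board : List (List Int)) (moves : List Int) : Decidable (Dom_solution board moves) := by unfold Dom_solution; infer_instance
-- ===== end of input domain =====

-- B replaces A's precomputed per-column stacks by scanning a board copy's column top-down for the
-- first doll on each move (objective: alternative decomposition; neither version mutates its arguments).

-- ===== PORT A =====
def solution (board : List (List Int)) (moves : List Int) : Int :=
  let n : Int := board.length
  -- stk = [[] for _ in range(len(board))]
  let stk0 : List (List Int) := (PySem.List.pyRange 0 n 1).map (fun _ => ([] : List Int))
  -- for i in range(len(board)-1, -1, -1): for j in range(len(board)): if board[i][j] != 0: stk[j].append(board[i][j])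
  let stk := (PySem.List.pyRange (n - 1) (-1) (-1)).foldl (fun stk i =>
      (PySem.List.pyRange 0 n 1).foldl (fun stk j =>
        if PySem.List.pyGetD (PySem.List.pyGetD board i []) j 0 ≠ 0 then
          PySem.List.pySetD stk j
            (PySem.List.pyGetD stk j [] ++ [PySem.List.pyGetD (PySem.List.pyGetD board i []) j 0])
        else stk) stk) stk0
  -- for move in moves: …
  let fin := moves.foldl (fun (st : List (List Int) × List Int × Int) move =>
      let stkc := PySem.List.pyGetD st.1 (move - 1) []   -- stk[move-1]; an IndexError is excluded by Pre_
      if stkc ≠ [] then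
        let v := stkc.getLast?.getD 0                    -- stk[move-1].pop() (nonempty here)
        let stk' := PySem.List.pySetD st.1 (move - 1) stkc.dropLast
        let basket := st.2.1 ++ [v]
        if 1 < basket.length ∧ PySem.List.pyGetD basket (-1) 0 = PySem.List.pyGetD basket (-2) 0 then
          (stk', basket.dropLast.dropLast, st.2.2 + 2)   -- basket.pop(); basket.pop(); answer += 2
        else (stk', basket, st.2.2)
      else st) (stk, ([] : List Int), (0 : Int))
  fin.2.2

-- ===== PORT B =====
-- the inner 'for row in grid: … break' loop: zero the first non-zero cell of column c, return it
def pvScan (grid : List (List Int)) (c : Int) : Option Int × List (List Int) :=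
  match grid with
  | [] => (none, [])
  | row :: rest =>
    let v := PySem.List.pyGetD row c 0                   -- row[c]; an IndexError is excluded by Pre_
    if v ≠ 0 then (some v, PySem.List.pySetD row c 0 :: rest)
    else
      let r := pvScan rest c
      (r.1, row :: r.2)

def solution_alt (board : List (List Int)) (moves : List Int) : Int :=
  let fin := moves.foldl (fun (st : List (List Int) × List Int × Int) move =>
      match pvScan st.1 (move - 1) with
      | (none, grid') => (grid', st.2.1, st.2.2)
      | (some v, grid') =>
        match st.2.1.getLast? with                        -- 'if basket and basket[-1] == v'
        | some t =>
          if t = v then (grid', st.2.1.dropLast, st.2.2 + 2)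
          else (grid', st.2.1 ++ [v], st.2.2)
        | none => (grid', st.2.1 ++ [v], st.2.2)) (board, ([] : List Int), (0 : Int))
  fin.2.2

-- ===== PRECONDITION & SPEC =====
-- Pre_ restricts to inputs where A returns and the column picked by a move is unambiguous: every row
-- at least as long as the board is high (A indexes every row at columns 0..n-1 and raises IndexError
-- on shorter rows), moves inside the Python index range of the n column stacks (outside it A raises
-- IndexError), and a square board whenever some move is non-positive (on a wider board a non-positive
-- move makes A pop stack n+m-1 while B reads the row's column from its own right end).
def Pre_solution (board : List (List Int)) (moves : List Int) : Prop :=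
  (∀ row ∈ board, board.length ≤ row.length) ∧
  (∀ m ∈ moves, 1 - (board.length : Int) ≤ m ∧ m ≤ (board.length : Int)) ∧
  ((∃ m ∈ moves, m ≤ 0) → ∀ row ∈ board, row.length = board.length)
instance (board : List (List Int)) (moves : List Int) : Decidable (Pre_solution board moves) := by
  unfold Pre_solution; infer_instance

def pvWitness_solution : List (List Int) × List Int := ([[0, 1], [2, 1]], [1, 2, 2])

def Spec_solution (board : List (List Int)) (moves : List Int) (out : Int) : Prop := out = solution_alt board moves
instance (board : List (List Int)) (moves : List Int) (out : Int) : Decidable (Spec_solution board moves out) := by unfold Spec_solution; infer_instance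

-- ===== CLAIM (what is proved, stated in full; the proofs are below) =====
def Claim_equal_solution : Prop := ∀ (board : List (List Int)) (moves : List Int), Dom_solution board moves → Pre_solution board moves → Spec_solution board moves (solution board moves)

-- ===== LEMMAS AND PROOFS =====

-- Python's wrapped index for i with -n ≤ i < n
def pvIdx (n : Nat) (i : Int) : Nat := if i < 0 then (i + n).toNat else i.toNat

-- column j of grid read top-down, zeros removed (A's stack stk[j] holds exactly this, reversed)
def colTD (grid : List (List Int)) (j : Nat) : List Int :=
  (grid.map (fun row => row.getD j 0)).filter (fun v => v != 0)

-- A's array of stacks, reconstructed from B's current board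
def pvRep (n : Nat) (grid : List (List Int)) : List (List Int) :=
  (List.range n).map (fun j => (colTD grid j).reverse)

-- A's per-move state-step (definitionally the lambda inside 'solution')
def pvStepA (st : List (List Int) × List Int × Int) (move : Int) : List (List Int) × List Int × Int :=
  let stkc := PySem.List.pyGetD st.1 (move - 1) []
  if stkc ≠ [] then
    let v := stkc.getLast?.getD 0
    let stk' := PySem.List.pySetD st.1 (move - 1) stkc.dropLast
    let basket := st.2.1 ++ [v]
    if 1 < basket.length ∧ PySem.List.pyGetD basket (-1) 0 = PySem.List.pyGetD basket (-2) 0 then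
      (stk', basket.dropLast.dropLast, st.2.2 + 2)
    else (stk', basket, st.2.2)
  else st

-- B's per-move state-step (definitionally the lambda inside 'solution_alt')
def pvStepB (st : List (List Int) × List Int × Int) (move : Int) : List (List Int) × List Int × Int :=
  match pvScan st.1 (move - 1) with
  | (none, grid') => (grid', st.2.1, st.2.2)
  | (some v, grid') =>
    match st.2.1.getLast? with
    | some t =>
      if t = v then (grid', st.2.1.dropLast, st.2.2 + 2)
      else (grid', st.2.1 ++ [v], st.2.2)
    | none => (grid', st.2.1 ++ [v], st.2.2)

lemma pyGetD_norm {α : Type} (xs : List α) (i : Int) (d : α)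
    (h1 : -(xs.length : Int) ≤ i) (h2 : i < xs.length) :
    PySem.List.pyGetD xs i d = xs.getD (pvIdx xs.length i) d := by
  by_cases h : 0 ≤ i
  · simp only [PySem.List.pyGetD, PySem.List.pyGet?, PySem.List.pyIdx?, pvIdx,
      if_pos h, if_pos h2, if_neg (by omega : ¬ i < 0), Option.bind_some,
      List.getD_eq_getElem?_getD]
  · simp only [PySem.List.pyGetD, PySem.List.pyGet?, PySem.List.pyIdx?, pvIdx,
      if_neg h, if_pos h1, if_pos (by omega : i < 0), Option.bind_some,
      List.getD_eq_getElem?_getD]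
    congr 2
    omega

lemma pySetD_norm {α : Type} (xs : List α) (i : Int) (v : α)
    (h1 : -(xs.length : Int) ≤ i) (h2 : i < xs.length) :
    PySem.List.pySetD xs i v = xs.set (pvIdx xs.length i) v := by
  by_cases h : 0 ≤ i
  · simp only [PySem.List.pySetD, PySem.List.pySet?, PySem.List.pyIdx?, pvIdx,
      if_pos h, if_pos h2, if_neg (by omega : ¬ i < 0), Option.map_some, Option.getD_some]
  · simp only [PySem.List.pySetD, PySem.List.pySet?, PySem.List.pyIdx?, pvIdx,
      if_neg h, if_pos h1, if_pos (by omega : i < 0), Option.map_some, Option.getD_some]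
    congr 1
    omega

lemma pvIdx_lt (n : Nat) (i : Int) (h1 : -(n : Int) ≤ i) (h2 : i < n) : pvIdx n i < n := by
  unfold pvIdx; split_ifs <;> omega

lemma colTD_cons (row : List Int) (g : List (List Int)) (j : Nat) :
    colTD (row :: g) j = (if row.getD j 0 != 0 then [row.getD j 0] else []) ++ colTD g j := by
  simp only [colTD, List.map_cons, List.filter_cons]
  split_ifs <;> simp_all

lemma pvRep_length (n : Nat) (g : List (List Int)) : (pvRep n g).length = n := by
  simp [pvRep]

lemma pvRep_getD (n : Nat) (g : List (List Int)) (j : Nat) (hj : j < n) :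
    (pvRep n g).getD j [] = (colTD g j).reverse := by
  simp [pvRep, List.getD_eq_getElem?_getD, hj]

lemma inner_fold (r : List Int) (stk : List (List Int)) (k : Nat) (hk : k ≤ stk.length) :
    ((List.range k).foldl (fun stk (j : Nat) =>
        if r.getD j 0 ≠ 0 then stk.set j (stk.getD j [] ++ [r.getD j 0]) else stk) stk).length = stk.length ∧
    ∀ j < stk.length, ((List.range k).foldl (fun stk (j : Nat) =>
        if r.getD j 0 ≠ 0 then stk.set j (stk.getD j [] ++ [r.getD j 0]) else stk) stk).getD j []
      = if j < k then stk.getD j [] ++ (if r.getD j 0 != 0 then [r.getD j 0] else []) else stk.getD j [] := by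
  induction k with
  | zero => simp
  | succ k ih =>
    obtain ⟨hlen, hget⟩ := ih (by omega)
    rw [List.range_succ, List.foldl_append]
    set F := (List.range k).foldl (fun stk (j : Nat) =>
        if r.getD j 0 ≠ 0 then stk.set j (stk.getD j [] ++ [r.getD j 0]) else stk) stk with hF
    simp only [List.foldl_cons, List.foldl_nil]
    constructor
    · split_ifs <;> simp [hlen]
    · intro j hj
      by_cases hc : r.getD k 0 ≠ 0
      · rw [if_pos hc]
        by_cases hjk : j = k
        · subst hjk
          rw [List.getD_eq_getElem?_getD, List.getElem?_set_self (by omega), Option.getD_some,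
            hget j (by omega), if_neg (by omega), if_pos (by omega), if_pos (by simpa using hc)]
        · rw [List.getD_eq_getElem?_getD, List.getElem?_set_ne (by omega),
            ← List.getD_eq_getElem?_getD, hget j hj]
          split_ifs <;> first | rfl | omega
      · rw [if_neg hc, hget j hj]
        have hck : (r.getD k 0 != 0) = false := by simp_all
        by_cases ha : j < k
        · rw [if_pos ha, if_pos (show j < k + 1 by omega)]
        · by_cases hb : j < k + 1
          · have hjk : j = k := by omega
            subst hjk
            rw [if_neg ha, if_pos hb, hck, if_neg (by simp), List.append_nil]
          · rw [if_neg ha, if_neg hb]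

lemma pvScan_lengths (grid : List (List Int)) (c : Int) :
    (pvScan grid c).2.map List.length = grid.map List.length := by
  induction grid with
  | nil => rfl
  | cons row rest ih =>
    simp only [pvScan]
    split_ifs with h
    · simp [PySem.List.length_pySetD]
    · simpa using ih

-- pvScan's full characterisation w.r.t. colTD
lemma pvScan_spec (c : Int) (j : Nat) :
    ∀ grid : List (List Int),
      (∀ row ∈ grid, PySem.List.pyGetD row c 0 = row.getD j 0 ∧
        PySem.List.pySetD row c 0 = row.set j 0 ∧ j < row.length) →
      (pvScan grid c).1 = (colTD grid j).head? ∧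
      (∀ j', colTD (pvScan grid c).2 j' = if j' = j then (colTD grid j).tail else colTD grid j') := by
  intro grid
  induction grid with
  | nil => intro _; refine ⟨rfl, ?_⟩
           intro j'; simp [colTD, pvScan]
  | cons row rest ih =>
    intro hrows
    obtain ⟨hget, hset, hjlt⟩ := hrows row (by simp)
    by_cases hv : row.getD j 0 ≠ 0
    · have hscan : pvScan (row :: rest) c = (some (row.getD j 0), row.set j 0 :: rest) := by
        simp only [pvScan, hget, hset, if_pos hv]
      have hsetget : ∀ j', (row.set j 0).getD j' 0 = if j' = j then (0:Int) else row.getD j' 0 := by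
        intro j'
        by_cases hjj : j' = j
        · subst hjj
          rw [if_pos rfl, List.getD_eq_getElem?_getD, List.getElem?_set_self (by omega), Option.getD_some]
        · rw [if_neg hjj, List.getD_eq_getElem?_getD, List.getElem?_set_ne (by omega), List.getD_eq_getElem?_getD]
      have hsetget' : ∀ j'', (row.set j 0)[j'']?.getD 0 = if j'' = j then (0:Int) else row[j'']?.getD 0 := by
        intro j''; simpa [List.getD_eq_getElem?_getD] using hsetget j''
      have hv' : ¬ row[j]?.getD 0 = 0 := by simpa [List.getD_eq_getElem?_getD] using hv
      have hcell : (row.getD j 0 != 0) = true := by simpa using hv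
      refine ⟨?_, ?_⟩
      · rw [hscan, colTD_cons, hcell]
        simp
      · intro j'
        rw [hscan]
        simp only
        by_cases hjj : j' = j
        · subst hjj
          simp [colTD_cons, hsetget', hv']
        · simp [colTD_cons, hsetget', hjj]
    · have hcell : (row.getD j 0 != 0) = false := by simpa using hv
      have hscan : pvScan (row :: rest) c = ((pvScan rest c).1, row :: (pvScan rest c).2) := by
        simp only [pvScan, hget, if_neg hv]
      obtain ⟨ih1, ih2⟩ := ih (fun r hr => hrows r (by simp [hr]))
      refine ⟨?_, ?_⟩
      · rw [hscan]; simp only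
        rw [colTD_cons, hcell, if_neg (by simp), List.nil_append, ih1]
      · intro j'
        rw [hscan]; simp only
        have hv0' : row[j]?.getD 0 = (0:Int) := by
          simpa [List.getD_eq_getElem?_getD] using hv
        by_cases hjj : j' = j
        · subst hjj
          simp [colTD_cons, ih2, hv0']
        · simp [colTD_cons, ih2, hjj]

-- one board row of A's build loop pushed on each stack
lemma inner_spec (board : List (List Int)) (g : List (List Int)) (m : Nat)
    (hm : m < board.length) :
    (PySem.List.pyRange 0 (board.length : Int) 1).foldl (fun stk j =>
        if PySem.List.pyGetD (PySem.List.pyGetD board (m : Int) []) j 0 ≠ 0 then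
          PySem.List.pySetD stk j
            (PySem.List.pyGetD stk j [] ++ [PySem.List.pyGetD (PySem.List.pyGetD board (m : Int) []) j 0])
        else stk) (pvRep board.length g)
    = pvRep board.length (board[m] :: g) := by
  have hb : PySem.List.pyGetD board (m : Int) [] = board[m] := by
    rw [PySem.List.pyGetD_natCast, List.getD_eq_getElem?_getD, List.getElem?_eq_getElem hm, Option.getD_some]
  rw [hb, PySem.List.pyRange_zero_nat, List.foldl_map]
  have hconv : ∀ (stk : List (List Int)) (k : Nat),
      (if PySem.List.pyGetD (board[m]) (k : Int) 0 ≠ 0 then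
        PySem.List.pySetD stk (k : Int)
          (PySem.List.pyGetD stk (k : Int) [] ++ [PySem.List.pyGetD (board[m]) (k : Int) 0])
      else stk)
      = (if (board[m]).getD k 0 ≠ 0 then stk.set k (stk.getD k [] ++ [(board[m]).getD k 0]) else stk) := by
    intro stk k
    simp [PySem.List.pyGetD_natCast, PySem.List.pySetD_natCast]
  simp only [hconv]
  obtain ⟨hlen, hget⟩ := inner_fold (board[m]) (pvRep board.length g) board.length
    (by rw [pvRep_length])
  apply List.ext_getElem
  · rw [hlen, pvRep_length, pvRep_length]
  · intro j hj1 hj2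
    have hjn : j < board.length := by rwa [hlen, pvRep_length] at hj1
    have h1 := hget j (by rw [pvRep_length]; exact hjn)
    rw [List.getD_eq_getElem?_getD, List.getElem?_eq_getElem hj1, Option.getD_some] at h1
    have h2 := pvRep_getD board.length (board[m] :: g) j hjn
    rw [List.getD_eq_getElem?_getD, List.getElem?_eq_getElem hj2, Option.getD_some] at h2
    rw [h1, if_pos hjn, pvRep_getD _ _ _ hjn, h2, colTD_cons, List.reverse_append]
    congr 1
    split_ifs <;> simp

-- A's stack-building double loop produces exactly pvRep n board
lemma build_aux (board : List (List Int)) :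
    ∀ m : Nat, m ≤ board.length →
    (PySem.List.pyRange ((m : Int) - 1) (-1) (-1)).foldl (fun stk i =>
        (PySem.List.pyRange 0 (board.length : Int) 1).foldl (fun stk j =>
          if PySem.List.pyGetD (PySem.List.pyGetD board i []) j 0 ≠ 0 then
            PySem.List.pySetD stk j
              (PySem.List.pyGetD stk j [] ++ [PySem.List.pyGetD (PySem.List.pyGetD board i []) j 0])
          else stk) stk) (pvRep board.length (board.drop m))
    = pvRep board.length board := by
  intro m
  induction m with
  | zero =>
    intro _
    rw [show ((0 : Nat) : Int) - 1 = -1 by norm_num, PySem.List.pyRange_neg_one_eq_nil (by norm_num)]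
    rw [List.foldl_nil, List.drop_zero]
  | succ m ih =>
    intro hm
    rw [show (((m + 1 : Nat)) : Int) - 1 = (m : Int) by push_cast; ring,
      PySem.List.pyRange_neg_one_cons (show (-1 : Int) < (m : Int) by omega), List.foldl_cons]
    rw [inner_spec board (board.drop (m + 1)) m (by omega),
      List.getElem_cons_drop, ih (by omega)]

lemma build_spec (board : List (List Int)) :
    (PySem.List.pyRange ((board.length : Int) - 1) (-1) (-1)).foldl (fun stk i =>
        (PySem.List.pyRange 0 (board.length : Int) 1).foldl (fun stk j =>
          if PySem.List.pyGetD (PySem.List.pyGetD board i []) j 0 ≠ 0 then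
            PySem.List.pySetD stk j
              (PySem.List.pyGetD stk j [] ++ [PySem.List.pyGetD (PySem.List.pyGetD board i []) j 0])
          else stk) stk)
      ((PySem.List.pyRange 0 (board.length : Int) 1).map (fun _ => ([] : List Int)))
    = pvRep board.length board := by
  have h0 : (PySem.List.pyRange 0 (board.length : Int) 1).map (fun _ => ([] : List Int))
      = pvRep board.length (board.drop board.length) := by
    rw [List.drop_length]
    simp only [pvRep, colTD, List.map_nil, List.filter_nil, List.reverse_nil,
      PySem.List.pyRange_zero_nat, List.map_map]
    rfl
  rw [h0]
  exact build_aux board board.length (le_refl _)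

lemma pyGetD_neg_two (ys : List Int) (p q : Int) :
    PySem.List.pyGetD (ys ++ [p, q]) (-2) 0 = p := by
  have hlen : (ys ++ [p, q]).length = ys.length + 2 := by simp
  rw [pyGetD_norm (ys ++ [p, q]) (-2) 0 (by rw [hlen]; omega) (by rw [hlen]; omega)]
  unfold pvIdx
  rw [if_pos (by omega), hlen]
  have hidx : ((-2 : Int) + (ys.length + 2 : Nat)).toNat = ys.length := by omega
  rw [hidx, List.getD_eq_getElem?_getD, List.getElem?_append_right (by omega)]
  simp

lemma pvRep_getElem (n : Nat) (g : List (List Int)) (j : Nat) (hj : j < (pvRep n g).length) :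
    (pvRep n g)[j] = (colTD g j).reverse := by
  simp [pvRep]

-- one move keeps the simulation relation
lemma step_one (n : Nat) (grid : List (List Int)) (bk : List Int) (a : Int) (m : Int)
    (hge : ∀ row ∈ grid, n ≤ row.length)
    (hsq : m ≤ 0 → ∀ row ∈ grid, row.length = n)
    (hm1 : 1 - (n : Int) ≤ m) (hm2 : m ≤ (n : Int)) :
    pvStepA (pvRep n grid, bk, a) m = (pvRep n (pvStepB (grid, bk, a) m).1, (pvStepB (grid, bk, a) m).2) ∧
    (pvStepB (grid, bk, a) m).1.map List.length = grid.map List.length := by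
  have hn : 0 < n := by omega
  have hj : pvIdx n (m - 1) < n := pvIdx_lt n (m - 1) (by omega) (by omega)
  have hrow : ∀ row ∈ grid, PySem.List.pyGetD row (m - 1) 0 = row.getD (pvIdx n (m - 1)) 0 ∧
      PySem.List.pySetD row (m - 1) 0 = row.set (pvIdx n (m - 1)) 0 ∧ pvIdx n (m - 1) < row.length := by
    intro row hr
    by_cases hm0 : m ≤ 0
    · have hrn := hsq hm0 row hr
      exact ⟨by rw [pyGetD_norm row _ _ (by rw [hrn]; omega) (by rw [hrn]; omega), hrn],
             by rw [pySetD_norm row _ _ (by rw [hrn]; omega) (by rw [hrn]; omega), hrn],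
             by rw [hrn]; exact hj⟩
    · have hidx : pvIdx n (m - 1) = (m - 1).toNat := by unfold pvIdx; rw [if_neg (by omega)]
      have hgr := hge row hr
      refine ⟨?_, ?_, ?_⟩
      · rw [PySem.List.pyGetD_of_nonneg row (0:Int) (by omega : (0:Int) ≤ m - 1), hidx]
      · rw [PySem.List.pySetD_of_nonneg row (0:Int) (by omega : (0:Int) ≤ m - 1), hidx]
      · rw [hidx]; omega
  have hstkc : PySem.List.pyGetD (pvRep n grid) (m - 1) [] = (colTD grid (pvIdx n (m - 1))).reverse := by
    rw [pyGetD_norm _ _ _ (by rw [pvRep_length]; omega)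
      (by rw [pvRep_length]; omega), pvRep_length, pvRep_getD _ _ _ hj]
  obtain ⟨s1, s2⟩ := pvScan_spec (m - 1) (pvIdx n (m - 1)) grid hrow
  have s3 := pvScan_lengths grid (m - 1)
  rcases hps : pvScan grid (m - 1) with ⟨o, grid'⟩
  rw [hps] at s1 s2 s3
  simp only at s1 s2 s3
  rcases hcol : colTD grid (pvIdx n (m - 1)) with _ | ⟨v, t⟩
  · rw [hcol] at s1 hstkc
    have ho : o = none := by simpa using s1
    subst ho
    have hB : pvStepB (grid, bk, a) m = (grid', bk, a) := by
      simp only [pvStepB, hps]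
    have hrep : pvRep n grid' = pvRep n grid := by
      apply List.map_congr_left
      intro j' _
      rw [s2 j']
      split_ifs with h
      · rw [h, hcol]; rfl
      · rfl
    have hA : pvStepA (pvRep n grid, bk, a) m = (pvRep n grid, bk, a) := by
      simp only [pvStepA, hstkc, List.reverse_nil, ne_eq, not_true_eq_false, if_false]
    refine ⟨?_, ?_⟩
    · rw [hA, hB]
      simp only [hrep]
    · rw [hB]; exact s3
  · rw [hcol] at s1 hstkc
    have ho : o = some v := by simpa using s1
    subst ho
    have hpop : ((v :: t).reverse.getLast?.getD 0 : Int) = v := by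
      rw [List.getLast?_reverse]; rfl
    have hdrop : (v :: t).reverse.dropLast = t.reverse := by
      rw [List.dropLast_reverse]; rfl
    have hset : PySem.List.pySetD (pvRep n grid) (m - 1) ((v :: t).reverse.dropLast)
        = pvRep n grid' := by
      rw [hdrop, pySetD_norm _ _ _ (by rw [pvRep_length]; omega) (by rw [pvRep_length]; omega),
        pvRep_length]
      apply List.ext_getElem
      · simp [pvRep_length]
      · intro j' h1 h2
        rw [List.getElem_set, pvRep_getElem n grid' j' h2, s2 j']
        by_cases h : pvIdx n (m - 1) = j'
        · rw [if_pos h, if_pos h.symm, hcol]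
          rfl
        · rw [if_neg h, if_neg (fun hh => h hh.symm),
            pvRep_getElem n grid j' (by rwa [List.length_set] at h1)]
    have hne : ((v :: t).reverse ≠ []) := by simp
    rcases bk.eq_nil_or_concat with rfl | ⟨bs, t', rfl⟩
    · have hA : pvStepA (pvRep n grid, [], a) m = (pvRep n grid', [v], a) := by
        simp only [pvStepA, hstkc]
        rw [if_pos hne]
        simp only [hpop, hset, List.nil_append]
        rw [if_neg (by simp)]
      have hB : pvStepB (grid, [], a) m = (grid', [] ++ [v], a) := by
        simp only [pvStepB, hps, List.getLast?_nil]
      refine ⟨?_, ?_⟩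
      · rw [hA, hB]; simp
      · rw [hB]; exact s3
    · simp only [List.concat_eq_append]
      have hlast : (bs ++ [t']).getLast? = some t' := by simp
      have hm1' : PySem.List.pyGetD ((bs ++ [t']) ++ [v]) (-1) 0 = v :=
        PySem.List.pyGetD_neg_one_append_singleton _ _ _
      have hm2' : PySem.List.pyGetD ((bs ++ [t']) ++ [v]) (-2) 0 = t' := by
        rw [List.append_assoc]
        exact pyGetD_neg_two bs t' v
      by_cases hvt : t' = v
      · have hA : pvStepA (pvRep n grid, bs ++ [t'], a) m = (pvRep n grid', bs, a + 2) := by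
          simp only [pvStepA, hstkc]
          rw [if_pos hne]
          simp only [hpop, hset]
          rw [if_pos ⟨by simp, by rw [hm1', hm2']; exact hvt.symm⟩]
          rw [List.dropLast_concat, List.dropLast_concat]
        have hB : pvStepB (grid, bs ++ [t'], a) m = (grid', bs, a + 2) := by
          simp only [pvStepB, hps, hlast]
          rw [if_pos hvt, List.dropLast_concat]
        refine ⟨?_, ?_⟩
        · rw [hA, hB]
        · rw [hB]; exact s3
      · have hA : pvStepA (pvRep n grid, bs ++ [t'], a) m
            = (pvRep n grid', (bs ++ [t']) ++ [v], a) := by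
          simp only [pvStepA, hstkc]
          rw [if_pos hne]
          simp only [hpop, hset]
          rw [if_neg (by rw [hm1', hm2']; exact fun h => hvt (h.2.symm))]
        have hB : pvStepB (grid, bs ++ [t'], a) m = (grid', (bs ++ [t']) ++ [v], a) := by
          simp only [pvStepB, hps, hlast]
          rw [if_neg hvt]
        refine ⟨?_, ?_⟩
        · rw [hA, hB]
        · rw [hB]; exact s3

lemma moves_fold (n : Nat) (moves : List Int)
    (hm : ∀ m ∈ moves, 1 - (n : Int) ≤ m ∧ m ≤ (n : Int)) :
    ∀ (grid : List (List Int)) (bk : List Int) (a : Int),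
      (∀ row ∈ grid, n ≤ row.length) →
      ((∃ m' ∈ moves, m' ≤ 0) → ∀ row ∈ grid, row.length = n) →
      (moves.foldl pvStepA (pvRep n grid, bk, a)).2 = (moves.foldl pvStepB (grid, bk, a)).2 := by
  induction moves with
  | nil => intro grid bk a _ _; rfl
  | cons m ms ih =>
    intro grid bk a hge hsq
    obtain ⟨h1, hpres⟩ := step_one n grid bk a m hge
      (fun hm0 => hsq ⟨m, by simp, hm0⟩) (hm m (by simp)).1 (hm m (by simp)).2
    have hlens : ∀ row' ∈ (pvStepB (grid, bk, a) m).1, ∃ row ∈ grid, row'.length = row.length := by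
      intro row' hr'
      have h := List.mem_map_of_mem (f := List.length) hr'
      rw [hpres] at h
      obtain ⟨row, hrow, heq⟩ := List.mem_map.mp h
      exact ⟨row, hrow, heq.symm⟩
    simp only [List.foldl_cons, h1]
    exact ih (fun x hx => hm x (by simp [hx])) _ _ _
      (fun row' hr' => by obtain ⟨row, hrow, heq⟩ := hlens row' hr'; rw [heq]; exact hge row hrow)
      (fun hex row' hr' => by obtain ⟨row, hrow, heq⟩ := hlens row' hr'; rw [heq]
                              exact hsq ⟨hex.choose, by have := hex.choose_spec; simp [this.1], hex.choose_spec.2⟩ row hrow)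

-- ===== VERDICT (by name: the statement is the Claim_ definition above) =====
theorem solution_spec : Claim_equal_solution := by
  intro board moves _ hpre
  obtain ⟨hge, hm, hsq⟩ := hpre
  unfold Spec_solution solution solution_alt
  simp only
  rw [show (fun (st : List (List Int) × List Int × Int) move =>
      let stkc := PySem.List.pyGetD st.1 (move - 1) []
      if stkc ≠ [] then
        let v := stkc.getLast?.getD 0
        let stk' := PySem.List.pySetD st.1 (move - 1) stkc.dropLast
        let basket := st.2.1 ++ [v]
        if 1 < basket.length ∧ PySem.List.pyGetD basket (-1) 0 = PySem.List.pyGetD basket (-2) 0 then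
          (stk', basket.dropLast.dropLast, st.2.2 + 2)
        else (stk', basket, st.2.2)
      else st) = pvStepA from rfl]
  rw [show (fun (st : List (List Int) × List Int × Int) move =>
      match pvScan st.1 (move - 1) with
      | (none, grid') => (grid', st.2.1, st.2.2)
      | (some v, grid') =>
        match st.2.1.getLast? with
        | some t =>
          if t = v then (grid', st.2.1.dropLast, st.2.2 + 2)
          else (grid', st.2.1 ++ [v], st.2.2)
        | none => (grid', st.2.1 ++ [v], st.2.2)) = pvStepB from rfl]
  rw [build_spec board]
  exact congrArg Prod.snd (moves_fold board.length moves hm board [] 0 hge hsq)
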